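-- pv_equiv track=rewrite | github.com/swarajbari18/Creator-joy | backend/creator_joy/engagement/benchmarks.py | get_tier
-- ===== SOURCE A (Python) =====
-- from typing import Optional
--
-- BENCHMARKS = {
--     "youtube": {
--         "nano":   {"min": 1000,    "max": 10000,   "median_er": 5.23, "good": 5.2, "excellent": 8.0},
--         "micro":  {"min": 10000,   "max": 50000,   "median_er": 3.74, "good": 3.7, "excellent": 6.0},
--         "mid":    {"min": 50000,   "max": 100000,  "median_er": 2.81, "good": 2.8, "excellent": 5.0},
--         "macro":  {"min": 100000,  "max": 500000,  "median_er": 2.12, "good": 2.1, "excellent": 4.0},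
--         "mega":   {"min": 500000,  "max": None,    "median_er": 1.41, "good": 1.4, "excellent": 3.0},
--     },
--     "tiktok": {
--         "nano":   {"min": 1000,    "max": 10000,   "median_er": 8.50, "good": 7.0, "excellent": 15.0},
--         "micro":  {"min": 10000,   "max": 100000,  "median_er": 7.12, "good": 6.0, "excellent": 12.0},
--         "mid":    {"min": 100000,  "max": 500000,  "median_er": 5.10, "good": 4.0, "excellent": 10.0},
--         "macro":  {"min": 500000,  "max": 1000000, "median_er": 4.48, "good": 3.0, "excellent": 8.0},
--         "mega":   {"min": 1000000, "max": None,    "median_er": 3.76, "good": 2.5, "excellent": 6.0},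
--     },
--     "instagram": {
--         "nano":   {"min": 1000,    "max": 10000,   "median_er": 5.00, "good": 4.0, "excellent": 8.0},
--         "micro":  {"min": 10000,   "max": 100000,  "median_er": 3.00, "good": 2.0, "excellent": 6.0},
--         "mid":    {"min": 100000,  "max": 500000,  "median_er": 2.25, "good": 1.5, "excellent": 4.0},
--         "macro":  {"min": 500000,  "max": 1000000, "median_er": 1.75, "good": 1.0, "excellent": 3.0},
--         "mega":   {"min": 1000000, "max": None,    "median_er": 1.25, "good": 0.5, "excellent": 2.0},
--     },
-- }
--
-- def get_tier(follower_count: Optional[int], platform: str) -> Optional[str]: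
--     """Return the creator tier label for the given follower count and platform."""
--     if follower_count is None:
--         return None
--     # Normalize platform name
--     platform = platform.lower()
--     if "youtube" in platform:
--         platform = "youtube"
--     elif "tiktok" in platform:
--         platform = "tiktok"
--     elif "instagram" in platform:
--         platform = "instagram"
--     else:
--         return None
--
--     tiers = BENCHMARKS.get(platform, {})
--     for tier_name, bounds in tiers.items():
--         lo = bounds["min"]
--         hi = bounds["max"]
--         if lo <= follower_count and (hi is None or follower_count < hi):
--             return tier_name
--     return None
-- ===== SOURCE B (Python) =====
-- from typing import Optional
--
-- # Lower bounds per tier, in ascending order, parallel to the tier names.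
-- TIER_NAMES = ["nano", "micro", "mid", "macro", "mega"]
-- THRESHOLDS = {
--     "youtube":   [1000, 10000, 50000, 100000, 500000],
--     "tiktok":    [1000, 10000, 100000, 500000, 1000000],
--     "instagram": [1000, 10000, 100000, 500000, 1000000],
-- }
--
-- def get_tier(follower_count: Optional[int], platform: str) -> Optional[str]:
--     """Return the creator tier label for the given follower count and platform."""
--     if follower_count is None:
--         return None
--     platform = platform.lower()
--     if "youtube" in platform:
--         platform = "youtube"
--     elif "tiktok" in platform:
--         platform = "tiktok"
--     elif "instagram" in platform:
--         platform = "instagram"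
--     else:
--         return None
--
--     thresholds = THRESHOLDS[platform]
--     # bisect_right by hand: first index whose threshold exceeds follower_count
--     lo, hi = 0, len(thresholds)
--     while lo < hi:
--         mid = (lo + hi) // 2
--         if follower_count < thresholds[mid]:
--             hi = mid
--         else:
--             lo = mid + 1
--     return TIER_NAMES[lo - 1] if lo else None
-- ===== Notes on version B (the rewrite author's own statement) =====
-- stated objective: alternative
-- what changed: Replaces the per-tier min/max range scan over the benchmark dicts with a hand-written bisect_right binary search over each platform's ascending lower-bound table (top tier open-ended, i==0 means below all tiers).
import Mathlib
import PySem

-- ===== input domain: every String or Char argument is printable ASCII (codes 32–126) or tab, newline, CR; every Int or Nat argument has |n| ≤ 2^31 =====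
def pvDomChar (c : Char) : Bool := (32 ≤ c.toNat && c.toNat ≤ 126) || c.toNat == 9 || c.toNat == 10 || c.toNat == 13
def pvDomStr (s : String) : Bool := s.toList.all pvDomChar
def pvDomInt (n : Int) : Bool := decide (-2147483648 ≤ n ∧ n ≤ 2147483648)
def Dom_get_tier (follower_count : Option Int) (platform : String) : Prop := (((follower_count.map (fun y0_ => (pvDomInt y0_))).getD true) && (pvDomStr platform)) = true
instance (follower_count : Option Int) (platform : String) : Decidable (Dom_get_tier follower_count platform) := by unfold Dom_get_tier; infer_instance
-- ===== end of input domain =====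

-- B replaces A's per-tier min/max range scan with a binary search over the ascending
-- lower-bound table (objective: alternative/idiomatic; same platform normalization).

-- ===== PORT A =====
-- A's BENCHMARKS dicts also carry float engagement fields (median_er/good/excellent)
-- that get_tier never reads; the port keeps only the (name, min, max) data A uses.
def pvTiersYoutube : List (String × Int × Option Int) :=
  [("nano", 1000, some 10000), ("micro", 10000, some 50000), ("mid", 50000, some 100000),
   ("macro", 100000, some 500000), ("mega", 500000, none)]
def pvTiersTiktok : List (String × Int × Option Int) :=
  [("nano", 1000, some 10000), ("micro", 10000, some 100000), ("mid", 100000, some 500000),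
   ("macro", 500000, some 1000000), ("mega", 1000000, none)]
def pvTiersInstagram : List (String × Int × Option Int) :=
  [("nano", 1000, some 10000), ("micro", 10000, some 100000), ("mid", 100000, some 500000),
   ("macro", 500000, some 1000000), ("mega", 1000000, none)]

-- the `for tier_name, bounds in tiers.items()` loop with its early return
-- (hi.all (fc < ·) is `hi is None or follower_count < hi`)
def pvScan (fc : Int) : List (String × Int × Option Int) → Option String
  | [] => none
  | (name, lo, hi) :: rest =>
      if lo ≤ fc && hi.all (fun h => fc < h) then some name
      else pvScan fc rest

def get_tier (follower_count : Option Int) (platform : String) : Option String :=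
  match follower_count with
  | none => none
  | some fc =>
    let p := PySem.Str.lower platform
    if PySem.Str.isIn "youtube" p then pvScan fc pvTiersYoutube
    else if PySem.Str.isIn "tiktok" p then pvScan fc pvTiersTiktok
    else if PySem.Str.isIn "instagram" p then pvScan fc pvTiersInstagram
    else none

-- ===== PORT B =====
def pvTierNames : List String := ["nano", "micro", "mid", "macro", "mega"]
def pvThYoutube : List Int := [1000, 10000, 50000, 100000, 500000]
def pvThTiktok : List Int := [1000, 10000, 100000, 500000, 1000000]
def pvThInstagram : List Int := [1000, 10000, 100000, 500000, 1000000]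

-- Source B's hand-written bisect_right `while lo < hi` loop (thresholds[mid] is always in
-- range there, so `getD mid 0` is exact)
def pvBisect (ths : List Int) (fc : Int) (lo hi : Nat) : Nat :=
  if _h : lo < hi then
    let mid := (lo + hi) / 2
    if fc < ths.getD mid 0 then pvBisect ths fc lo mid
    else pvBisect ths fc (mid + 1) hi
  else lo
termination_by hi - lo
decreasing_by all_goals omega

def get_tier_alt (follower_count : Option Int) (platform : String) : Option String :=
  match follower_count with
  | none => none
  | some fc =>
    let p := PySem.Str.lower platform
    let ths? : Option (List Int) :=
      if PySem.Str.isIn "youtube" p then some pvThYoutube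
      else if PySem.Str.isIn "tiktok" p then some pvThTiktok
      else if PySem.Str.isIn "instagram" p then some pvThInstagram
      else none
    match ths? with
    | none => none
    | some ths =>
      let lo := pvBisect ths fc 0 ths.length
      if lo = 0 then none else pvTierNames[lo - 1]?

-- ===== PRECONDITION & SPEC =====
def Spec_get_tier (follower_count : Option Int) (platform : String) (out : Option String) : Prop := out = get_tier_alt follower_count platform
instance (follower_count : Option Int) (platform : String) (out : Option String) : Decidable (Spec_get_tier follower_count platform out) := by unfold Spec_get_tier; infer_instance

-- ===== CLAIM (what is proved, stated in full; the proofs are below) =====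
def Claim_equal_get_tier : Prop := ∀ (follower_count : Option Int) (platform : String), Dom_get_tier follower_count platform → Spec_get_tier follower_count platform (get_tier follower_count platform)

-- ===== LEMMAS AND PROOFS =====

theorem pvBisect_eq (ths : List Int) (fc : Int) (lo hi : Nat) :
    pvBisect ths fc lo hi =
      if lo < hi then
        if fc < ths.getD ((lo + hi) / 2) 0 then pvBisect ths fc lo ((lo + hi) / 2)
        else pvBisect ths fc ((lo + hi) / 2 + 1) hi
      else lo := by
  rw [pvBisect]; simp only [dite_eq_ite]

theorem scan_youtube (fc : Int) :
    pvScan fc pvTiersYoutube =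
      (if pvBisect pvThYoutube fc 0 5 = 0 then none
       else pvTierNames[pvBisect pvThYoutube fc 0 5 - 1]?) := by
  simp [pvScan, pvTiersYoutube, pvThYoutube, pvBisect_eq]
  split_ifs <;> simp_all [pvTierNames] <;> omega

theorem scan_tiktok (fc : Int) :
    pvScan fc pvTiersTiktok =
      (if pvBisect pvThTiktok fc 0 5 = 0 then none
       else pvTierNames[pvBisect pvThTiktok fc 0 5 - 1]?) := by
  simp [pvScan, pvTiersTiktok, pvThTiktok, pvBisect_eq]
  split_ifs <;> simp_all [pvTierNames] <;> omega

theorem scan_instagram (fc : Int) :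
    pvScan fc pvTiersInstagram =
      (if pvBisect pvThInstagram fc 0 5 = 0 then none
       else pvTierNames[pvBisect pvThInstagram fc 0 5 - 1]?) := by
  simp [pvScan, pvTiersInstagram, pvThInstagram, pvBisect_eq]
  split_ifs <;> simp_all [pvTierNames] <;> omega

-- ===== VERDICT (by name: the statement is the Claim_ definition above) =====
theorem get_tier_spec : Claim_equal_get_tier := by
  intro fc? platform _
  unfold Spec_get_tier get_tier get_tier_alt
  cases fc? with
  | none => rfl
  | some fc =>
    simp only
    split_ifs <;>
      simp [scan_youtube, scan_tiktok, scan_instagram, pvThYoutube, pvThTiktok, pvThInstagram]
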